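-- pv_equiv track=rewrite | github.com/garyalex/pythonpractice | pybites/106.py | strip_vowels
-- ===== SOURCE A (Python) =====
-- text = """
-- The Zen of Python, by Tim Peters
--
-- Beautiful is better than ugly.
-- Explicit is better than implicit.
-- Simple is better than complex.
-- Complex is better than complicated.
-- Flat is better than nested.
-- Sparse is better than dense.
-- Readability counts.
-- Special cases aren't special enough to break the rules.
-- Although practicality beats purity.
-- Errors should never pass silently.
-- Unless explicitly silenced.
-- In the face of ambiguity, refuse the temptation to guess.
-- There should be one-- and preferably only one --obvious way to do it.
-- Although that way may not be obvious at first unless you're Dutch.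
-- Now is better than never.
-- Although never is often better than *right* now.
-- If the implementation is hard to explain, it's a bad idea.
-- If the implementation is easy to explain, it may be a good idea.
-- Namespaces are one honking great idea -- let's do more of those!
-- """
--
-- vowels = 'aeiou'
--
-- def strip_vowels(text=text):
--     """Replace all vowels by *, return newly formed string
--        and number of replacements done"""
--     result = ""
--     counter = 0
--     for c in text:
--         if c.lower() in vowels:
--             result += "*"
--             counter += 1
--         else:
--             result += c
--     return result, counter
-- ===== SOURCE B (Python) =====
-- text = """
-- The Zen of Python, by Tim Peters
--
-- Beautiful is better than ugly.
-- Explicit is better than implicit.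
-- Simple is better than complex.
-- Complex is better than complicated.
-- Flat is better than nested.
-- Sparse is better than dense.
-- Readability counts.
-- Special cases aren't special enough to break the rules.
-- Although practicality beats purity.
-- Errors should never pass silently.
-- Unless explicitly silenced.
-- In the face of ambiguity, refuse the temptation to guess.
-- There should be one-- and preferably only one --obvious way to do it.
-- Although that way may not be obvious at first unless you're Dutch.
-- Now is better than never.
-- Although never is often better than *right* now.
-- If the implementation is hard to explain, it's a bad idea.
-- If the implementation is easy to explain, it may be a good idea.
-- Namespaces are one honking great idea -- let's do more of those!
-- """
--
-- _VOWELS = 'aeiouAEIOU'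
-- _TABLE = str.maketrans(_VOWELS, '*' * len(_VOWELS))
--
-- def strip_vowels(text=text):
--     """Replace all vowels by *, return newly formed string
--        and number of replacements done"""
--     count = sum(1 for c in text if c in _VOWELS)
--     return text.translate(_TABLE), count
-- ===== Notes on version B (the rewrite author's own statement) =====
-- stated objective: idiomatic
-- what changed: Replaces the fused per-character if/else accumulate loop with two independent passes: a generator-sum counting pass and a str.translate substitution via a precomputed translation table (C-level table lookup instead of per-character Python-level branching and concatenation).
import Mathlib
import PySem

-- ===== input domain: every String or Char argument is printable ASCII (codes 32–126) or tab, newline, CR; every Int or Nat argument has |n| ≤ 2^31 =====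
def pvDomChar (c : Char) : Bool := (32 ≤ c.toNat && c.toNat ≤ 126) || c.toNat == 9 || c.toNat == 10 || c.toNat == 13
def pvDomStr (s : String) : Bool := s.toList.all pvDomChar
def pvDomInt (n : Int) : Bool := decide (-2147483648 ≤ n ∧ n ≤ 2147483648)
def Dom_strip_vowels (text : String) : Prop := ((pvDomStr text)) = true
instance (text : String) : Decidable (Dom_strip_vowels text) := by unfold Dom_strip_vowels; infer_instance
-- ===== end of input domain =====

-- B replaces A's fused accumulate loop with a separate counting pass plus a translation-table map (idiomatic decomposition).

-- ===== PORT A =====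
-- vowels = 'aeiou'
def pvVowelsA : List Char := ['a', 'e', 'i', 'o', 'u']

def strip_vowels (text : String) : String × Int :=
  let st := text.toList.foldl
    (fun (acc : List Char × Int) c =>
      if pvVowelsA.contains (PySem.Chars.lowerChar c) then
        (acc.1 ++ ['*'], acc.2 + 1)
      else
        (acc.1 ++ [c], acc.2))
    ([], 0)
  (String.mk st.1, st.2)

-- ===== PORT B =====
-- _VOWELS = 'aeiouAEIOU'
def pvVowelsB : List Char := ['a', 'e', 'i', 'o', 'u', 'A', 'E', 'I', 'O', 'U']
-- _TABLE = str.maketrans(_VOWELS, '*' * 10): a lookup table mapping each vowel to '*'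
def pvTableB : List (Char × Char) := pvVowelsB.map (fun c => (c, '*'))

def strip_vowels_alt (text : String) : String × Int :=
  -- count = sum(1 for c in text if c in _VOWELS)
  let count : Int := (text.toList.countP (fun c => pvVowelsB.contains c) : Nat)
  -- text.translate(_TABLE): each char is replaced by its table image, or kept
  let result : String := String.mk (text.toList.map (fun c => ((pvTableB.lookup c).getD c)))
  (result, count)

-- ===== PRECONDITION & SPEC =====
def Spec_strip_vowels (text : String) (out : String × Int) : Prop := out = strip_vowels_alt text
instance (text : String) (out : String × Int) : Decidable (Spec_strip_vowels text out) := by unfold Spec_strip_vowels; infer_instance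

-- ===== CLAIM (what is proved, stated in full; the proofs are below) =====
def Claim_equal_strip_vowels : Prop := ∀ (text : String), Dom_strip_vowels text → Spec_strip_vowels text (strip_vowels text)

-- ===== LEMMAS AND PROOFS =====

-- Char equality transfers to code points
lemma char_eq_iff_toNat (a b : Char) : (a == b) = (a.toNat == b.toNat) := by
  cases a; cases b
  simp [Char.ext_iff, Char.toNat, UInt32.toNat_inj]

-- A's per-char vowel test (lowercase, then test against 'aeiou') agrees with B's
-- direct membership test against 'aeiouAEIOU', for every Char
lemma vowel_test_eq (c : Char) :
    pvVowelsA.contains (PySem.Chars.lowerChar c) = pvVowelsB.contains c := by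
  simp only [pvVowelsA, pvVowelsB, PySem.Chars.lowerChar, PySem.Chars.isupper,
    List.contains_cons, List.contains_nil, Bool.or_false]
  split_ifs with h
  · simp only [Bool.and_eq_true, decide_eq_true_eq, Char.le_def] at h
    have h65 : 65 ≤ c.toNat := by
      have := h.1; exact_mod_cast UInt32.le_iff_toNat_le.mp this
    have h90 : c.toNat ≤ 90 := by
      have := h.2; exact_mod_cast UInt32.le_iff_toNat_le.mp this
    have hv : (Char.ofNat (c.toNat + 32)).toNat = c.toNat + 32 := by
      rw [Char.toNat_ofNat, if_pos]
      left; omega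
    simp only [char_eq_iff_toNat, hv]
    simp only [show ('a':Char).toNat = 97 from rfl, show ('e':Char).toNat = 101 from rfl,
      show ('i':Char).toNat = 105 from rfl, show ('o':Char).toNat = 111 from rfl,
      show ('u':Char).toNat = 117 from rfl, show ('A':Char).toNat = 65 from rfl,
      show ('E':Char).toNat = 69 from rfl, show ('I':Char).toNat = 73 from rfl,
      show ('O':Char).toNat = 79 from rfl, show ('U':Char).toNat = 85 from rfl]
    rw [Bool.eq_iff_iff]
    simp only [Bool.or_eq_true, beq_iff_eq]
    omega
  · simp only [Bool.and_eq_true, decide_eq_true_eq, Char.le_def, not_and_or] at h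
    have hne : ∀ u : Char, 65 ≤ u.toNat → u.toNat ≤ 90 → (c == u) = false := by
      intro u h1 h2
      rw [char_eq_iff_toNat]
      simp only [beq_eq_false_iff_ne]
      intro he
      have he' : c.val.toNat = u.val.toNat := he
      have h1' : 65 ≤ u.val.toNat := h1
      have h2' : u.val.toNat ≤ 90 := h2
      have hA : ('A' : Char).val.toNat = 65 := rfl
      have hZ : ('Z' : Char).val.toNat = 90 := rfl
      rcases h with h | h
      · exact h (UInt32.le_iff_toNat_le.mpr (by omega))
      · exact h (UInt32.le_iff_toNat_le.mpr (by omega))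
    rw [hne 'A' (by decide) (by decide), hne 'E' (by decide) (by decide),
        hne 'I' (by decide) (by decide), hne 'O' (by decide) (by decide),
        hne 'U' (by decide) (by decide)]
    simp

-- Lookup in a constant-valued table built over a key list
lemma lookup_const_map (c : Char) (l : List Char) :
    (l.map (fun k => (k, '*'))).lookup c = if l.contains c then some '*' else none := by
  induction l with
  | nil => simp
  | cons a t ih =>
    by_cases h : c = a
    · subst h; simp
    · simp only [List.map_cons, List.lookup_cons, List.contains_cons,
        show (c == a) = false from beq_eq_false_iff_ne.mpr h]
      simpa using ih

-- B's table lookup is '*' on vowels and the identity elsewhere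
lemma table_lookup_eq (c : Char) :
    (pvTableB.lookup c).getD c = if pvVowelsB.contains c then '*' else c := by
  rw [pvTableB, lookup_const_map]
  by_cases h : pvVowelsB.contains c = true
  · rw [if_pos h, if_pos h]; rfl
  · rw [if_neg h, if_neg h]; rfl

-- A's fold, with a generalized accumulator, computes B's map and count
lemma foldA_eq (l : List Char) (r : List Char) (k : Int) :
    l.foldl
      (fun (acc : List Char × Int) c =>
        if pvVowelsA.contains (PySem.Chars.lowerChar c) then
          (acc.1 ++ ['*'], acc.2 + 1)
        else
          (acc.1 ++ [c], acc.2)) (r, k)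
    = (r ++ l.map (fun c => ((pvTableB.lookup c).getD c)),
       k + (l.countP (fun c => pvVowelsB.contains c) : Nat)) := by
  induction l generalizing r k with
  | nil => simp
  | cons c t ih =>
    simp only [List.foldl_cons, List.map_cons, List.countP_cons]
    rw [vowel_test_eq c, table_lookup_eq c]
    by_cases h : pvVowelsB.contains c = true
    · rw [if_pos h, if_pos h, if_pos h, ih]
      refine Prod.ext ?_ ?_
      · simp
      · push_cast; ring
    · rw [if_neg h, if_neg h, if_neg h, ih]
      refine Prod.ext ?_ ?_
      · simp
      · simp

-- ===== VERDICT (by name: the statement is the Claim_ definition above) =====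
theorem strip_vowels_spec : Claim_equal_strip_vowels := by
  intro text _
  unfold Spec_strip_vowels strip_vowels strip_vowels_alt
  rw [foldA_eq]
  simp
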